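-- pv_equiv track=rewrite | github.com/Bad3r/nixos | scripts/update-logseq-sources.py | find_map_bounds
-- ===== SOURCE A (Python) =====
-- def find_map_bounds(content: str, needle_index: int) -> tuple[int, int] | None:
--     depth = 0
--     start = None
--     for i in range(needle_index, -1, -1):
--         ch = content[i]
--         if ch == '}':
--             depth += 1
--         elif ch == '{':
--             if depth == 0:
--                 start = i
--                 break
--             depth -= 1
--     if start is None:
--         return None
--     depth = 0
--     for j in range(start, len(content)):
--         ch = content[j]
--         if ch == '{':
--             depth += 1
--         elif ch == '}':
--             depth -= 1
--             if depth == 0: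
--                 return start, j
--     return None
-- ===== SOURCE B (Python) =====
-- def find_map_bounds(content: str, needle_index: int) -> tuple[int, int] | None:
--     # Single forward pass with a stack of open-brace indices: the first popped
--     # pair (o, j) that encloses needle_index (o <= needle_index < j) is the
--     # innermost brace-balanced map around it.
--     stack = []
--     for j, ch in enumerate(content):
--         if ch == '{':
--             stack.append(j)
--         elif ch == '}' and stack:
--             o = stack.pop()
--             if o <= needle_index < j:
--                 return o, j
--     return None
-- ===== Notes on version B (the rewrite author's own statement) =====
-- stated objective: alternative
-- what changed: Replaced A's two-phase backward depth-counter scan plus forward rescan with a single forward pass that keeps a stack of open-brace indices and returns the first popped pair (o, j) with o <= needle_index < j.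
import Mathlib
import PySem

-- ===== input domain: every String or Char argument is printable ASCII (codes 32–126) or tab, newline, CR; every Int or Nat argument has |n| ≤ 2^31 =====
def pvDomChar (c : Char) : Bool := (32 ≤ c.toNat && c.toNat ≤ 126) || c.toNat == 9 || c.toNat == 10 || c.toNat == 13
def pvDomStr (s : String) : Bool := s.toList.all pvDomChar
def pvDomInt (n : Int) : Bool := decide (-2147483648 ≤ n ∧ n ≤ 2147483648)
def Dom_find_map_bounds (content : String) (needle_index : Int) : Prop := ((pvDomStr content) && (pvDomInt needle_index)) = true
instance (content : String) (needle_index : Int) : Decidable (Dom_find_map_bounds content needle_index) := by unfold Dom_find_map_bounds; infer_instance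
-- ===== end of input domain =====

-- B replaces A's backward depth-counter scan + forward rescan with one forward pass keeping a
-- stack of open-brace indices (objective: alternative algorithm, same O(n) cost).

-- ===== PORT A =====
-- first loop of A: for i in range(needle_index, -1, -1): … (depth counter, backward)
def fmbA_loop1 (cs : List Char) : List Int → Int → Option Int
  | [], _ => none
  | i :: rest, depth =>
    match PySem.List.pyGet? cs i with
    | none => none   -- IndexError: excluded by Pre_
    | some ch =>
      if ch = '}' then fmbA_loop1 cs rest (depth + 1)
      else if ch = '{' then
        if depth = 0 then some i else fmbA_loop1 cs rest (depth - 1)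
      else fmbA_loop1 cs rest depth

-- second loop of A: for j in range(start, len(content)): … (depth counter, forward)
def fmbA_loop2 (cs : List Char) (start : Int) : List Int → Int → Option (Int × Int)
  | [], _ => none
  | j :: rest, depth =>
    match PySem.List.pyGet? cs j with
    | none => none   -- unreachable for 0 ≤ j < len
    | some ch =>
      if ch = '{' then fmbA_loop2 cs start rest (depth + 1)
      else if ch = '}' then
        if depth - 1 = 0 then some (start, j) else fmbA_loop2 cs start rest (depth - 1)
      else fmbA_loop2 cs start rest depth

def find_map_bounds (content : String) (needle_index : Int) : Option (Int × Int) :=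
  match fmbA_loop1 content.toList (PySem.List.pyRange needle_index (-1) (-1)) 0 with
  | none => none
  | some start =>
      fmbA_loop2 content.toList start (PySem.List.pyRange start (PySem.Str.len content) 1) 0

-- ===== PORT B =====
-- B: one forward pass over enumerate(content) with a stack of open-brace indices
def fmbB_loop (needle : Int) : List (Int × Char) → List Int → Option (Int × Int)
  | [], _ => none
  | (j, ch) :: rest, stack =>
    if ch = '{' then fmbB_loop needle rest (j :: stack)
    else if ch = '}' then
      match stack with
      | [] => fmbB_loop needle rest []
      | o :: s => if o ≤ needle ∧ needle < j then some (o, j) else fmbB_loop needle rest s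
    else fmbB_loop needle rest stack

def find_map_bounds_alt (content : String) (needle_index : Int) : Option (Int × Int) :=
  fmbB_loop needle_index (PySem.List.enumerate content.toList 0) []

-- ===== PRECONDITION & SPEC =====
-- A raises IndexError iff needle_index ≥ len(content) (its first backward access is content[needle_index]).
def Pre_find_map_bounds (content : String) (needle_index : Int) : Prop :=
  needle_index < PySem.Str.len content
instance (content : String) (needle_index : Int) : Decidable (Pre_find_map_bounds content needle_index) := by
  unfold Pre_find_map_bounds; infer_instance

def pvWitness_find_map_bounds : String × Int := ("{a}", 1)

def Spec_find_map_bounds (content : String) (needle_index : Int) (out : Option (Int × Int)) : Prop := out = find_map_bounds_alt content needle_index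
instance (content : String) (needle_index : Int) (out : Option (Int × Int)) : Decidable (Spec_find_map_bounds content needle_index out) := by unfold Spec_find_map_bounds; infer_instance

-- ===== CLAIM (what is proved, stated in full; the proofs are below) =====
def Claim_equal_find_map_bounds : Prop := ∀ (content : String) (needle_index : Int), Dom_find_map_bounds content needle_index → Pre_find_map_bounds content needle_index → Spec_find_map_bounds content needle_index (find_map_bounds content needle_index)


-- ===== LEMMAS AND PROOFS =====

-- the canonical forward stack of unmatched open-brace indices after the first m characters
def fmbStk (cs : List Char) : Nat → List Int
  | 0 => []
  | m+1 =>
    if cs.getD m ' ' = '{' then (m : Int) :: fmbStk cs m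
    else if cs.getD m ' ' = '}' then (fmbStk cs m).tail
    else fmbStk cs m

theorem fmbStk_mem_bound (cs : List Char) (m : Nat) (x : Int) (hx : x ∈ fmbStk cs m) :
    0 ≤ x ∧ x < (m : Int) := by
  induction m with
  | zero => simp [fmbStk] at hx
  | succ m ih =>
    simp only [fmbStk] at hx
    split_ifs at hx with h1 h2
    · rcases List.mem_cons.1 hx with hx | hx
      · subst hx; constructor <;> omega
      · rcases ih hx with ⟨h1', h2'⟩; exact ⟨h1', by omega⟩
    · rcases ih (List.mem_of_mem_tail hx) with ⟨h1', h2'⟩; exact ⟨h1', by omega⟩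
    · rcases ih hx with ⟨h1', h2'⟩; exact ⟨h1', by omega⟩

theorem fmbStk_sorted (cs : List Char) (m : Nat) : (fmbStk cs m).Pairwise (· > ·) := by
  induction m with
  | zero => simp [fmbStk]
  | succ m ih =>
    simp only [fmbStk]
    split_ifs with h1 h2
    · exact List.Pairwise.cons (fun y hy => (fmbStk_mem_bound cs m y hy).2) ih
    · exact ih.sublist (List.tail_sublist _)
    · exact ih

theorem fmbStk_mem_succ (cs : List Char) (m : Nat) (x : Int) (hx : x ∈ fmbStk cs (m+1)) :
    x = (m : Int) ∨ x ∈ fmbStk cs m := by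
  simp only [fmbStk] at hx
  split_ifs at hx with h1 h2
  · exact List.mem_cons.1 hx
  · exact Or.inr (List.mem_of_mem_tail hx)
  · exact Or.inr hx

theorem fmbStk_mem_down (cs : List Char) (M t : Nat) (x : Int) (hx : x ∈ fmbStk cs M)
    (h1 : x < (t : Int)) (h2 : t ≤ M) : x ∈ fmbStk cs t := by
  induction M with
  | zero => simp [fmbStk] at hx
  | succ M ih =>
    rcases Nat.eq_or_lt_of_le h2 with h | h
    · subst h; exact hx
    · rcases fmbStk_mem_succ cs M x hx with h3 | h3
      · exfalso; omega
      · exact ih h3 (by omega)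

-- A's backward loop with depth d reads off the d-th element of the forward stack
theorem fmbA_loop1_eq (cs : List Char) (m : Nat) (hm : m ≤ cs.length) (d : Nat) :
    fmbA_loop1 cs (PySem.List.pyRange ((m : Int) - 1) (-1) (-1)) (d : Int) = (fmbStk cs m)[d]? := by
  induction m generalizing d with
  | zero =>
    rw [show ((0 : Nat) : Int) - 1 = -1 by norm_num,
      PySem.List.pyRange_neg_one_eq_nil (by norm_num)]
    simp [fmbA_loop1, fmbStk]
  | succ m ih =>
    have hmlt : m < cs.length := by omega
    rw [show ((m+1 : Nat) : Int) - 1 = (m : Int) by push_cast; ring,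
      PySem.List.pyRange_neg_one_cons (by omega)]
    simp only [fmbA_loop1, PySem.List.pyGet?_natCast, List.getElem?_eq_getElem hmlt,
      fmbStk, List.getD_eq_getElem cs ' ' hmlt]
    by_cases h1 : cs[m] = '}'
    · have h2 : ¬ cs[m] = '{' := by rw [h1]; decide
      rw [if_pos h1, if_neg h2, if_pos h1,
        show ((d : Int) + 1) = ((d + 1 : Nat) : Int) by push_cast; ring, ih (by omega) (d+1),
        List.getElem?_tail]
    · by_cases h2 : cs[m] = '{'
      · rw [if_neg h1, if_pos h2, if_pos h2]
        cases d with
        | zero => rw [if_pos (by norm_num)]; simp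
        | succ d' =>
          rw [if_neg (by exact_mod_cast Nat.succ_ne_zero d'),
            show ((d' + 1 : Nat) : Int) - 1 = ((d' : Nat) : Int) by push_cast; ring,
            ih (by omega) d', List.getElem?_cons_succ]
      · rw [if_neg h1, if_neg h2, if_neg h2, if_neg h1, ih (by omega) d]

theorem fmbB_none (n : Int) (l : List (Int × Char)) (s : List Int)
    (hs : ∀ x ∈ s, n < x) (hl : ∀ p ∈ l, n < p.1) : fmbB_loop n l s = none := by
  induction l generalizing s with
  | nil => simp [fmbB_loop]
  | cons p rest ih =>
    obtain ⟨j, c⟩ := p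
    have hj : n < j := hl (j, c) (by simp)
    have hrest : ∀ p ∈ rest, n < p.1 := fun p hp => hl p (by simp [hp])
    simp only [fmbB_loop]
    split_ifs with h1 h2
    · refine ih (j :: s) ?_ hrest
      intro x hx
      rcases List.mem_cons.1 hx with h | h
      · subst h; exact hj
      · exact hs x h
    · cases s with
      | nil => exact ih [] (by simp) hrest
      | cons o s' =>
        have ho : n < o := hs o (by simp)
        dsimp only
        rw [if_neg (by omega)]
        exact ih s' (fun x hx => hs x (by simp [hx])) hrest
    · exact ih s hs hrest

-- B's scan over the prefix up to position t (≤ needle+1) never returns and builds fmbStk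
theorem fmbB_prefix (cs : List Char) (n : Int) (t : Nat) (ht : t ≤ cs.length)
    (hn : (t : Int) ≤ n + 1) :
    fmbB_loop n (PySem.List.enumerate cs 0) [] =
      fmbB_loop n (PySem.List.enumerate (cs.drop t) (t : Int)) (fmbStk cs t) := by
  induction t with
  | zero => simp [fmbStk]
  | succ t ih =>
    rw [ih (by omega) (by push_cast at hn ⊢; omega)]
    have hmlt : t < cs.length := by omega
    have htn : (t : Int) ≤ n := by push_cast at hn; omega
    rw [List.drop_eq_getElem_cons hmlt, PySem.List.enumerate_cons]
    simp only [fmbB_loop, fmbStk, List.getD_eq_getElem cs ' ' hmlt]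
    by_cases h1 : cs[t] = '{'
    · rw [if_pos h1, if_pos h1, show ((t+1 : Nat) : Int) = (t : Int) + 1 by push_cast; ring]
    · by_cases h2 : cs[t] = '}'
      · rw [if_neg h1, if_pos h2, if_neg h1, if_pos h2,
          show ((t+1 : Nat) : Int) = (t : Int) + 1 by push_cast; ring]
        cases fmbStk cs t with
        | nil => rfl
        | cons o st => dsimp only; rw [if_neg (by omega), List.tail_cons]
      · rw [if_neg h1, if_neg h2, if_neg h1, if_neg h2,
          show ((t+1 : Nat) : Int) = (t : Int) + 1 by push_cast; ring]

-- joint simulation of A's forward loop and B's loop past the needle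
theorem fmb_main (cs : List Char) (n start : Int) :
    ∀ (k t : Nat) (s₁ s₀ : List Int), cs.length ≤ t + k → (∀ x ∈ s₁, n < x) →
      start ≤ n → n < (t : Int) →
      fmbA_loop2 cs start (PySem.List.pyRange (t : Int) (cs.length : Int) 1) ((s₁.length : Int) + 1) =
        fmbB_loop n (PySem.List.enumerate (cs.drop t) (t : Int)) (s₁ ++ start :: s₀) := by
  intro k
  induction k with
  | zero =>
    intro t s₁ s₀ hlen _ _ _
    rw [List.drop_of_length_le (by omega), PySem.List.pyRange_one_eq_nil (by exact_mod_cast hlen)]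
    simp [fmbA_loop2, fmbB_loop, PySem.List.enumerate_nil]
  | succ k ih =>
    intro t s₁ s₀ hlen hs1 hstart ht
    by_cases hfin : cs.length ≤ t
    · rw [List.drop_of_length_le hfin, PySem.List.pyRange_one_eq_nil (by exact_mod_cast hfin)]
      simp [fmbA_loop2, fmbB_loop, PySem.List.enumerate_nil]
    · have hmlt : t < cs.length := by omega
      rw [List.drop_eq_getElem_cons hmlt, PySem.List.enumerate_cons,
        PySem.List.pyRange_one_cons (by exact_mod_cast hmlt)]
      simp only [fmbA_loop2, fmbB_loop, PySem.List.pyGet?_natCast, List.getElem?_eq_getElem hmlt]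
      by_cases h1 : cs[t] = '{'
      · rw [if_pos h1, if_pos h1]
        have hx : ∀ x ∈ (t : Int) :: s₁, n < x := by
          intro x hx
          rcases List.mem_cons.1 hx with h | h
          · subst h; exact ht
          · exact hs1 x h
        have key := ih (t+1) ((t : Int) :: s₁) s₀ (by omega) hx hstart (by push_cast; omega)
        simp only [List.length_cons, List.cons_append] at key
        push_cast at key ⊢
        exact key
      · by_cases h2 : cs[t] = '}'
        · rw [if_neg h1, if_pos h2, if_neg h1, if_pos h2]
          cases s₁ with
          | nil =>
            dsimp only [List.nil_append]
            rw [if_pos (by simp), if_pos ⟨hstart, ht⟩]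
          | cons x s₁' =>
            have hxn : n < x := hs1 x (by simp)
            dsimp only [List.cons_append]
            rw [if_neg (by simp; omega), if_neg (by omega)]
            have key := ih (t+1) s₁' s₀ (by omega)
              (fun y hy => hs1 y (by simp [hy])) hstart (by push_cast; omega)
            simp only [List.length_cons] at ⊢ key
            push_cast at key ⊢
            ring_nf at key ⊢
            exact key
        · rw [if_neg h1, if_neg h2, if_neg h1, if_neg h2]
          have key := ih (t+1) s₁ s₀ (by omega) hs1 hstart (by push_cast; omega)
          push_cast at key ⊢
          exact key

-- A's forward loop from start reaches the needle with depth = count of stack entries ≥ start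
theorem fmbA_prefix (cs : List Char) (a T : Nat) (hT : T ≤ cs.length)
    (haT : (a : Int) ∈ fmbStk cs T) :
    fmbA_loop2 cs (a : Int) (PySem.List.pyRange (a : Int) (cs.length : Int) 1) 0 =
      fmbA_loop2 cs (a : Int) (PySem.List.pyRange (T : Int) (cs.length : Int) 1)
        (((fmbStk cs T).countP (fun x => decide ((a : Int) ≤ x)) : Int)) := by
  have ha : a < T := by
    have := (fmbStk_mem_bound cs T _ haT).2; exact_mod_cast this
  have key : ∀ (k t : Nat), a ≤ t → t + k = T →
      fmbA_loop2 cs (a : Int) (PySem.List.pyRange (t : Int) (cs.length : Int) 1)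
        (((fmbStk cs t).countP (fun x => decide ((a : Int) ≤ x)) : Int)) =
      fmbA_loop2 cs (a : Int) (PySem.List.pyRange (T : Int) (cs.length : Int) 1)
        (((fmbStk cs T).countP (fun x => decide ((a : Int) ≤ x)) : Int)) := by
    intro k
    induction k with
    | zero => intro t _ hk; rw [show t = T by omega]
    | succ k ih =>
      intro t hat hk
      have hmlt : t < cs.length := by omega
      rw [← ih (t+1) (by omega) (by omega)]
      rw [PySem.List.pyRange_one_cons (by exact_mod_cast hmlt)]
      simp only [fmbA_loop2, PySem.List.pyGet?_natCast, List.getElem?_eq_getElem hmlt]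
      have hstep : fmbStk cs (t+1) =
          (if cs[t] = '{' then (t : Int) :: fmbStk cs t
           else if cs[t] = '}' then (fmbStk cs t).tail else fmbStk cs t) := by
        simp only [fmbStk, List.getD_eq_getElem cs ' ' hmlt]
      by_cases h1 : cs[t] = '{'
      · rw [if_pos h1, hstep, if_pos h1]
        have hb : decide ((a : Int) ≤ (t : Int)) = true := decide_eq_true (by exact_mod_cast hat)
        simp only [List.countP_cons, hb, if_true]
        have key : ((fmbStk cs t).countP (fun x => decide ((a : Int) ≤ x)) : Int) + 1 =
            (((fmbStk cs t).countP (fun x => decide ((a : Int) ≤ x)) + 1 : Nat) : Int) := by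
          push_cast; ring
        rw [key, show ((t : Int) + 1) = ((t+1 : Nat) : Int) by push_cast; ring]
      · by_cases h2 : cs[t] = '}'
        · rw [if_neg h1, if_pos h2, hstep, if_neg h1, if_pos h2]
          have hmem1 : (a : Int) ∈ fmbStk cs (t+1) :=
            fmbStk_mem_down cs T (t+1) (a : Int) haT (by exact_mod_cast Nat.lt_succ_of_le hat) (by omega)
          rw [hstep, if_neg h1, if_pos h2] at hmem1
          cases hst : fmbStk cs t with
          | nil => rw [hst] at hmem1; simp at hmem1
          | cons h rest' =>
            rw [hst] at hmem1
            simp only [List.tail_cons] at hmem1 ⊢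
            have hsort := fmbStk_sorted cs t
            rw [hst, List.pairwise_cons] at hsort
            have hha : (a : Int) ≤ h := le_of_lt (hsort.1 _ hmem1)
            have hpos : 0 < rest'.countP (fun x => decide ((a : Int) ≤ x)) :=
              List.countP_pos_iff.2 ⟨(a : Int), hmem1, by simp⟩
            have hb : decide ((a : Int) ≤ h) = true := decide_eq_true hha
            simp only [List.countP_cons, hb, if_true]
            rw [if_neg (by push_cast; omega)]
            rw [show (((rest'.countP (fun x => decide ((a : Int) ≤ x)) + 1 : Nat) : Int) - 1) =
                ((rest'.countP (fun x => decide ((a : Int) ≤ x)) : Nat) : Int) by push_cast; ring,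
              show ((t : Int) + 1) = ((t+1 : Nat) : Int) by push_cast; ring]
        · rw [if_neg h1, if_neg h2, hstep, if_neg h1, if_neg h2,
            show ((t : Int) + 1) = ((t+1 : Nat) : Int) by push_cast; ring]
  have h0 : (fmbStk cs a).countP (fun x => decide ((a : Int) ≤ x)) = 0 := by
    rw [List.countP_eq_zero]
    intro x hx
    have := (fmbStk_mem_bound cs a x hx).2
    simp only [decide_eq_true_eq]; omega
  have := key (T - a) a (le_refl a) (by omega)
  rw [h0] at this
  exact_mod_cast this

-- ===== VERDICT (by name: the statement is the Claim_ definition above) =====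
theorem find_map_bounds_spec : Claim_equal_find_map_bounds := by
  intro content n hdom hpre
  unfold Spec_find_map_bounds find_map_bounds find_map_bounds_alt
  unfold Pre_find_map_bounds at hpre
  rw [PySem.Str.len_eq] at hpre
  rw [PySem.Str.len_eq]
  set cs := content.toList with hcs
  by_cases hneg : n < 0
  · rw [PySem.List.pyRange_neg_one_eq_nil (by omega)]
    show (none : Option (Int × Int)) = fmbB_loop n (PySem.List.enumerate cs 0) []
    symm
    apply fmbB_none n _ [] (by simp)
    intro p hp
    rcases (PySem.List.mem_enumerate_iff cs 0 p).1 hp with ⟨k, hk, rfl⟩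
    simp only
    omega
  · have hn0 : (0 : Int) ≤ n := by omega
    obtain ⟨m', rfl⟩ : ∃ m' : Nat, n = (m' : Int) := ⟨n.toNat, (Int.toNat_of_nonneg hn0).symm⟩
    have hT : m' + 1 ≤ cs.length := by omega
    have hA := fmbA_loop1_eq cs (m' + 1) hT 0
    rw [show ((m' + 1 : Nat) : Int) - 1 = ((m' : Nat) : Int) by push_cast; ring] at hA
    simp only [Nat.cast_zero] at hA
    rw [hA, fmbB_prefix cs ((m' : Nat) : Int) (m' + 1) hT (by push_cast; omega)]
    cases hst : fmbStk cs (m' + 1) with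
    | nil =>
      simp only [List.getElem?_nil]
      show (none : Option (Int × Int)) = _
      symm
      apply fmbB_none _ _ _ (by simp)
      intro p hp
      rcases (PySem.List.mem_enumerate_iff _ _ p).1 hp with ⟨k, hk, rfl⟩
      simp only
      push_cast
      omega
    | cons s0 v =>
      simp only [List.getElem?_cons_zero]
      show fmbA_loop2 cs s0 (PySem.List.pyRange s0 ((cs.length : Nat) : Int) 1) 0 = _
      have hmem : s0 ∈ fmbStk cs (m' + 1) := by rw [hst]; exact List.mem_cons_self
      have hb := fmbStk_mem_bound cs (m' + 1) s0 hmem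
      obtain ⟨a, rfl⟩ : ∃ a : Nat, s0 = (a : Int) := ⟨s0.toNat, (Int.toNat_of_nonneg hb.1).symm⟩
      have hsort := fmbStk_sorted cs (m' + 1)
      rw [hst, List.pairwise_cons] at hsort
      have hv0 : v.countP (fun x => decide ((a : Int) ≤ x)) = 0 := by
        rw [List.countP_eq_zero]
        intro x hx
        have := hsort.1 x hx
        simp only [decide_eq_true_eq]
        omega
      have hcnt : (fmbStk cs (m' + 1)).countP (fun x => decide ((a : Int) ≤ x)) = 1 := by
        rw [hst]
        simp [hv0]
      rw [fmbA_prefix cs a (m' + 1) hT hmem, hcnt]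
      have hle : (a : Int) ≤ ((m' : Nat) : Int) := by
        have h2 := hb.2
        push_cast at h2
        omega
      have key := fmb_main cs ((m' : Nat) : Int) ((a : Nat) : Int) (cs.length - (m' + 1)) (m' + 1)
        [] v (by omega) (by simp) hle (by push_cast; omega)
      simpa only [List.length_nil, Nat.cast_zero, Nat.cast_one, zero_add, List.nil_append] using key
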